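-- pv_equiv track=rewrite | github.com/loaiali/Arabic-OCR | postprocessing/WFST/Lfst/getLexiconFst.py | lexiconToFst
-- ===== SOURCE A (Python) =====
-- epsSym = '٭'
--
-- startSym = 'ـسـ'
--
-- endSym = 'ـأـ'
--
-- terminateSym = 'ـتـ'
--
-- spaceSym = 'ـ'
--
-- backOffSym = 'ـجـ'
--
-- reservedDisampig = ["D0", "D00"]
--
-- def lexiconToFst(lexicons):
--     fst = [
--         f'{0} {1} {startSym} {startSym}',
--         f'{1} {1} {backOffSym} {backOffSym}',
--         f'{1} {2} {spaceSym} {startSym}',  # may be restart a new sentnece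
--         f'{2} {1} {reservedDisampig[0]} {epsSym}',
--         f'{1} {3} {spaceSym} {epsSym}',  # seprate between words
--         f'{3} {1} {reservedDisampig[1]} {epsSym}',
--     ]
--     intial_state = 1
--     avail_state = 4
--     for word, letters in lexicons.items():
--         for i, letter in enumerate(letters):
--             src, dst, inp, out = (intial_state, avail_state, letter, epsSym)
--             if(len(letters) == 1):
--                 dst = intial_state
--                 out = word
--             elif(i == 0):
--                 dst = avail_state
--                 out = word
--             elif(i == len(letters)-1):
--                 src = avail_state
--                 dst = intial_state
--                 avail_state += 1
--             else:
--                 src = avail_state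
--                 dst = avail_state+1
--                 avail_state += 1
--
--             fst.append(f'{src} {dst} {inp} {out}')
--
--     end = avail_state
--     final = end+1
--     # alwys end with space
--     fst.append(f'{intial_state} {end} {spaceSym} {endSym}')
--     fst.append(f'{end} {final} {terminateSym} {epsSym}')
--     fst.append(f'{final}')
--     return fst
-- ===== SOURCE B (Python) =====
-- epsSym = '٭'
-- startSym = 'ـسـ'
-- endSym = 'ـأـ'
-- terminateSym = 'ـتـ'
-- spaceSym = 'ـ'
-- backOffSym = 'ـجـ'
-- reservedDisampig = ["D0", "D00"]
--
-- def _word_transitions(word, letters, avail):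
--     """Return (new_avail, lines): the transitions for one word starting
--     from free state `avail`, built from the explicit list of path states."""
--     L = len(letters)
--     if L == 0:
--         return avail, []
--     if L == 1:
--         states = [1, 1]
--         new_avail = avail
--     else:
--         states = [1] + list(range(avail, avail + L - 1)) + [1]
--         new_avail = avail + L - 1
--     outs = [word] + [epsSym] * (L - 1)
--     lines = [f'{src} {dst} {inp} {out}'
--              for src, dst, inp, out in zip(states, states[1:], letters, outs)]
--     return new_avail, lines
--
-- def lexiconToFst(lexicons):
--     fst = [
--         f'{0} {1} {startSym} {startSym}',
--         f'{1} {1} {backOffSym} {backOffSym}',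
--         f'{1} {2} {spaceSym} {startSym}',
--         f'{2} {1} {reservedDisampig[0]} {epsSym}',
--         f'{1} {3} {spaceSym} {epsSym}',
--         f'{3} {1} {reservedDisampig[1]} {epsSym}',
--     ]
--     avail = 4
--     for word, letters in lexicons.items():
--         avail, lines = _word_transitions(word, letters, avail)
--         fst += lines
--     fst.append(f'{1} {avail} {spaceSym} {endSym}')
--     fst.append(f'{avail} {avail + 1} {terminateSym} {epsSym}')
--     fst.append(f'{avail + 1}')
--     return fst
-- ===== Notes on version B (the rewrite author's own statement) =====
-- stated objective: alternative
-- what changed: B replaces A's per-index four-way branch (with mutable src/dst/out fixups and in-loop avail increments) by computing, per word, the explicit list of path states once and then zipping consecutive states with the letters and output symbols.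
import Mathlib
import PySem

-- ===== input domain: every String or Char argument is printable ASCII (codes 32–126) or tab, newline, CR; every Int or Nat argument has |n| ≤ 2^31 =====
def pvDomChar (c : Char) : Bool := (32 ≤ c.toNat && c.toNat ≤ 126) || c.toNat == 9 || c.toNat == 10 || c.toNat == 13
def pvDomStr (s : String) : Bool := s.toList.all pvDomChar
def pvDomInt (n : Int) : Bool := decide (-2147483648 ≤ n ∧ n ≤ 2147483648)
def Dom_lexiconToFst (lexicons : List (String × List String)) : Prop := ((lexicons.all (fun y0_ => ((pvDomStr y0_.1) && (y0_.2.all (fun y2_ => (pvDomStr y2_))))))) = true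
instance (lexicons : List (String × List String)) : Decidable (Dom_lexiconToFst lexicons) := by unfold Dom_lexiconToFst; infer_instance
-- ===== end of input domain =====

-- B builds each word's transition lines from an explicit path-states list zipped with the
-- letters, instead of A's per-index four-way branch; alternative decomposition, same cost.

-- shared module constants (the Python module-level symbols)
def pvEps : String := "٭"
def pvStartSym : String := "ـسـ"
def pvEndSym : String := "ـأـ"
def pvTermSym : String := "ـتـ"
def pvSpaceSym : String := "ـ"
def pvBackSym : String := "ـجـ"

-- f'{src} {dst} {inp} {out}'
def pvLine (src dst : Int) (inp out : String) : String :=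
  PySem.Int.toStr src ++ " " ++ PySem.Int.toStr dst ++ " " ++ inp ++ " " ++ out

-- the six fixed prefix lines
def pvPrefix : List String :=
  [pvLine 0 1 pvStartSym pvStartSym,
   pvLine 1 1 pvBackSym pvBackSym,
   pvLine 1 2 pvSpaceSym pvStartSym,
   pvLine 2 1 "D0" pvEps,
   pvLine 1 3 pvSpaceSym pvEps,
   pvLine 3 1 "D00" pvEps]

-- ===== PORT A =====
-- body of A's inner 'for i, letter in enumerate(letters)' loop; state = (avail_state, fst)
def pvAstep (word : String) (n : Nat) (st : Int × List String) (p : Int × String) : Int × List String :=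
  let avail := st.1
  let letter := p.2
  if n = 1 then
    (avail, st.2 ++ [pvLine 1 1 letter word])
  else if p.1 = 0 then
    (avail, st.2 ++ [pvLine 1 avail letter word])
  else if p.1 = (n : Int) - 1 then
    (avail + 1, st.2 ++ [pvLine avail 1 letter pvEps])
  else
    (avail + 1, st.2 ++ [pvLine avail (avail + 1) letter pvEps])

def lexiconToFst (lexicons : List (String × List String)) : List String :=
  let st := lexicons.foldl
    (fun st wl => (PySem.List.enumerate wl.2 0).foldl (pvAstep wl.1 wl.2.length) st)
    ((4 : Int), pvPrefix)
  let endS := st.1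
  let finalS := endS + 1
  st.2 ++ [pvLine 1 endS pvSpaceSym pvEndSym, pvLine endS finalS pvTermSym pvEps,
           PySem.Int.toStr finalS]

-- ===== PORT B =====
-- _word_transitions: explicit path-states list, zipped with letters and outputs
def pvWordTransitions (word : String) (letters : List String) (avail : Int) :
    Int × List String :=
  let L := letters.length
  if L = 0 then (avail, [])
  else
    let states : List Int :=
      if L = 1 then [1, 1]
      else [1] ++ PySem.List.pyRange avail (avail + (L : Int) - 1) 1 ++ [1]
    let newAvail : Int := if L = 1 then avail else avail + (L : Int) - 1
    let outs : List String := [word] ++ List.replicate (L - 1) pvEps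
    let lines := (List.zip (List.zip states states.tail) (List.zip letters outs)).map
      (fun q => pvLine q.1.1 q.1.2 q.2.1 q.2.2)
    (newAvail, lines)

def lexiconToFst_alt (lexicons : List (String × List String)) : List String :=
  let st := lexicons.foldl
    (fun st wl =>
      let r := pvWordTransitions wl.1 wl.2 st.1
      (r.1, st.2 ++ r.2))
    ((4 : Int), pvPrefix)
  st.2 ++ [pvLine 1 st.1 pvSpaceSym pvEndSym, pvLine st.1 (st.1 + 1) pvTermSym pvEps,
           PySem.Int.toStr (st.1 + 1)]

-- ===== PRECONDITION & SPEC =====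
def Spec_lexiconToFst (lexicons : List (String × List String)) (out : List String) : Prop := out = lexiconToFst_alt lexicons
instance (lexicons : List (String × List String)) (out : List String) : Decidable (Spec_lexiconToFst lexicons out) := by unfold Spec_lexiconToFst; infer_instance

-- ===== CLAIM (what is proved, stated in full; the proofs are below) =====
def Claim_equal_lexiconToFst : Prop := ∀ (lexicons : List (String × List String)), Dom_lexiconToFst lexicons → Spec_lexiconToFst lexicons (lexiconToFst lexicons)

-- ===== LEMMAS AND PROOFS =====

-- canonical shape of the non-first transition lines of one word
def pvTailLines (avail : Int) : List String → List String
  | [] => []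
  | [x] => [pvLine avail 1 x pvEps]
  | x :: y :: r => pvLine avail (avail + 1) x pvEps :: pvTailLines (avail + 1) (y :: r)

-- A's inner fold over the tail of the letters (enumerate start s ≥ 1, n = s + ss.length)
theorem pvA_tail (word : String) : ∀ (ss : List String) (s : Int) (avail : Int)
    (fst : List String) (n : Nat), ss ≠ [] → 1 ≤ s → s + ss.length = (n : Int) →
    (PySem.List.enumerate ss s).foldl (pvAstep word n) (avail, fst)
      = (avail + ss.length, fst ++ pvTailLines avail ss) := by
  intro ss
  induction ss with
  | nil => simp
  | cons x t ih =>
    intro s avail fst n _ hs hn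
    rw [PySem.List.enumerate_cons]
    cases t with
    | nil =>
      simp only [List.foldl, PySem.List.enumerate_nil, pvAstep, pvTailLines]
      simp only [List.length_cons, List.length_nil] at hn
      have hn1 : ¬ (n = 1) := by omega
      have hs0 : ¬ (s = 0) := by omega
      have hlast : s = (n : Int) - 1 := by push_cast at hn ⊢; omega
      have h2 : ¬ ((n : Int) - 1 = 0) := by omega
      simp [hn1, hlast, h2]
    | cons y r =>
      simp only [List.foldl]
      have hn1 : ¬ (n = 1) := by
        simp only [List.length_cons] at hn; push_cast at hn; omega
      have hs0 : ¬ (s = 0) := by omega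
      have hlast : ¬ (s = (n : Int) - 1) := by
        simp only [List.length_cons] at hn; push_cast at hn; omega
      rw [show pvAstep word n (avail, fst) (s, x)
            = (avail + 1, fst ++ [pvLine avail (avail + 1) x pvEps]) by
          simp [pvAstep, hn1, hs0, hlast]]
      rw [ih (s + 1) (avail + 1) (fst ++ [pvLine avail (avail + 1) x pvEps]) n
          (by simp) (by omega) (by simp only [List.length_cons] at hn ⊢; push_cast at hn ⊢; omega)]
      simp only [List.length_cons, pvTailLines, List.append_assoc, List.cons_append,
        List.nil_append, Prod.mk.injEq]
      constructor
      · push_cast; omega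
      · trivial

-- B's zip construction on the tail equals pvTailLines
theorem pvB_tail : ∀ (ss : List String) (avail : Int), ss ≠ [] →
    (List.zip (List.zip (PySem.List.pyRange avail (avail + ss.length) 1 ++ [1])
        (PySem.List.pyRange (avail + 1) (avail + ss.length) 1 ++ [1]))
      (List.zip ss (List.replicate ss.length pvEps))).map
        (fun q => pvLine q.1.1 q.1.2 q.2.1 q.2.2)
      = pvTailLines avail ss := by
  intro ss
  induction ss with
  | nil => simp
  | cons x t ih =>
    intro avail _
    cases t with
    | nil =>
      rw [show avail + ((([x] : List String).length : Int)) = avail + 1 by simp]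
      rw [PySem.List.pyRange_one_cons (by omega), PySem.List.pyRange_one_eq_nil (by omega)]
      simp [pvTailLines]
    | cons y r =>
      have hpos : (0:Int) < ((y :: r).length : Int) := by
        simp only [List.length_cons]; push_cast; omega
      have hlen : avail + (((x :: y :: r).length : Int)) = (avail + 1) + ((y :: r).length : Int) := by
        simp only [List.length_cons]; push_cast; ring
      rw [hlen]
      rw [PySem.List.pyRange_one_cons (by omega)]
      rw [show PySem.List.pyRange (avail + 1) (avail + 1 + ((y :: r).length : Int)) 1
            = (avail + 1) :: PySem.List.pyRange (avail + 1 + 1) (avail + 1 + ((y :: r).length : Int)) 1 from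
          PySem.List.pyRange_one_cons (by omega)]
      simp only [List.length_cons, List.replicate_succ, List.cons_append, List.zip_cons_cons,
        List.map_cons, pvTailLines]
      congr 1
      have h2 := ih (avail + 1) (by simp)
      rw [show PySem.List.pyRange (avail + 1) (avail + 1 + (((y :: r).length : Nat) : Int)) 1
            = (avail + 1) :: PySem.List.pyRange (avail + 1 + 1) (avail + 1 + (((y :: r).length : Nat) : Int)) 1 from
          PySem.List.pyRange_one_cons (by omega)] at h2
      simp only [List.length_cons, List.replicate_succ, List.cons_append, List.zip_cons_cons,
        ] at h2
      exact h2

-- per-word: A's inner fold = B's word transitions appended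
theorem pvWord_eq (word : String) (letters : List String) (avail : Int) (fst : List String) :
    (PySem.List.enumerate letters 0).foldl (pvAstep word letters.length) (avail, fst)
      = ((pvWordTransitions word letters avail).1,
         fst ++ (pvWordTransitions word letters avail).2) := by
  cases letters with
  | nil => simp [pvWordTransitions, PySem.List.enumerate_nil]
  | cons l0 t =>
    cases t with
    | nil =>
      simp [pvWordTransitions, PySem.List.enumerate_cons, PySem.List.enumerate_nil,
        pvAstep, List.zip]
    | cons l1 r =>
      rw [PySem.List.enumerate_cons]
      simp only [List.foldl]
      have hn1 : ¬ ((l0 :: l1 :: r).length = 1) := by simp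
      rw [show pvAstep word (l0 :: l1 :: r).length (avail, fst) (0, l0)
            = (avail, fst ++ [pvLine 1 avail l0 word]) by simp [pvAstep]]
      simp only [zero_add]
      rw [pvA_tail word (l1 :: r) 1 avail (fst ++ [pvLine 1 avail l0 word])
          (l0 :: l1 :: r).length (by simp) (by omega) (by simp; ring)]
      -- now compute B's side
      have hL0 : ¬ ((l0 :: l1 :: r).length = 0) := by simp
      have hL1 : ¬ ((l0 :: l1 :: r).length = 1) := hn1
      simp only [pvWordTransitions, hL0, hL1, if_false]
      have harith : avail + (((l0 :: l1 :: r).length : Nat) : Int) - 1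
          = avail + ((l1 :: r).length : Int) := by
        simp only [List.length_cons]; push_cast; ring
      rw [harith]
      have hpos : avail < avail + ((l1 :: r).length : Int) := by
        simp only [List.length_cons]; push_cast; omega
      rw [PySem.List.pyRange_one_cons hpos]
      simp only [List.cons_append, List.nil_append, List.tail_cons,
        List.length_cons, List.zip_cons_cons, List.map_cons]
      simp only [Nat.add_sub_cancel, Prod.mk.injEq]
      have h3 := pvB_tail (l1 :: r) avail (by simp)
      rw [show PySem.List.pyRange avail (avail + (((l1 :: r).length : Nat) : Int)) 1
            = avail :: PySem.List.pyRange (avail + 1) (avail + (((l1 :: r).length : Nat) : Int)) 1 from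
          PySem.List.pyRange_one_cons (by simp only [List.length_cons]; push_cast; omega)] at h3
      simp only [List.length_cons, List.cons_append] at h3
      refine ⟨trivial, ?_⟩
      rw [h3]
      simp [List.append_assoc]

-- the two outer folds agree from any state
theorem pvFold_eq (lexicons : List (String × List String)) :
    ∀ (st : Int × List String),
    lexicons.foldl
      (fun st wl => (PySem.List.enumerate wl.2 0).foldl (pvAstep wl.1 wl.2.length) st) st
    = lexicons.foldl
      (fun st wl =>
        let r := pvWordTransitions wl.1 wl.2 st.1
        (r.1, st.2 ++ r.2)) st := by
  induction lexicons with
  | nil => intro st; rfl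
  | cons wl t ih =>
    intro st
    simp only [List.foldl]
    rw [pvWord_eq wl.1 wl.2 st.1 st.2, ih]

-- ===== VERDICT (by name: the statement is the Claim_ definition above) =====
theorem lexiconToFst_spec : Claim_equal_lexiconToFst := by
  intro lexicons _
  unfold Spec_lexiconToFst lexiconToFst lexiconToFst_alt
  rw [pvFold_eq]
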